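-- pv_equiv track=rewrite | github.com/atorpos/leetcodedaily | hackerrank_mock/countMinimumOperations.py | countMinOperations
-- ===== SOURCE A (Python) =====
-- from bisect import bisect_left
--
-- def countMinOperations(distance, targetDistance):
--     distance.sort()
--     n = len(distance)
--
--     prefix_sum = [0] * (n + 1)
--     for i in range(n):
--         prefix_sum[i + 1] = prefix_sum[i] + distance[i]
--
--     result = []
--     for target in targetDistance:
--         idx = bisect_left(distance, target)
--         left_sum = idx * target - prefix_sum[idx]
--         right_sum = (prefix_sum[n] - prefix_sum[idx]) - (n - idx) * target
--
--         total_operations = left_sum + right_sum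
--         result.append(total_operations)
--
--     return result
-- ===== SOURCE B (Python) =====
-- def countMinOperations(distance, targetDistance):
--     distance.sort()  # keep A's in-place mutation of the argument
--     return [sum(abs(d - target) for d in distance) for target in targetDistance]
-- ===== Notes on version B (the rewrite author's own statement) =====
-- stated objective: simpler
-- what changed: Drops the prefix-sum array and binary search; each result is computed by a direct scan summing |d - target| over the (still in-place sorted) list.
import Mathlib
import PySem

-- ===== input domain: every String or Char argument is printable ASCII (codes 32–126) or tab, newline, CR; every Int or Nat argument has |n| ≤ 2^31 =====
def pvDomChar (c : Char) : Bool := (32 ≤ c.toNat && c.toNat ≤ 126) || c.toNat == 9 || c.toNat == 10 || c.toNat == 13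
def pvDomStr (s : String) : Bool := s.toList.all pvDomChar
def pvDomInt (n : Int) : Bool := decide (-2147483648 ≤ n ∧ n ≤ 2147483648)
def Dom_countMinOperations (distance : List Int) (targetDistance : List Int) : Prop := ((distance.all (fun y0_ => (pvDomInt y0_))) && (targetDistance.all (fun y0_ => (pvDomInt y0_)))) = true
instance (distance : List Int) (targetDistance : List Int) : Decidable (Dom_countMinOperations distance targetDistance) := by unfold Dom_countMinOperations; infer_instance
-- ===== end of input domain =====

-- ===== PORT A =====
-- One honest line: B drops A's prefix-sum array and binary search for a direct
-- per-target scan over the sorted list (simpler; equivalence is about the return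
-- value; both A and B sort `distance` in place in Python).
-- bisect_left is the PySem primitive for Python's bisect.bisect_left.
def countMinOperations (distance : List Int) (targetDistance : List Int) : List Int :=
  let s := PySem.List.sorted distance (fun x => x)
  let n := s.length
  -- prefix_sum = [0]*(n+1); for i in range(n): prefix_sum[i+1] = prefix_sum[i] + distance[i]
  let prefix_sum := (List.range n).foldl
    (fun ps i => ps.set (i+1) (ps.getD i 0 + s.getD i 0)) (List.replicate (n+1) 0)
  targetDistance.foldl (fun result target =>
    let idx := PySem.List.bisectLeft s target
    let left_sum := (idx : Int) * target - prefix_sum.getD idx 0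
    let right_sum := (prefix_sum.getD n 0 - prefix_sum.getD idx 0) - ((n : Int) - (idx : Int)) * target
    result ++ [left_sum + right_sum]) []

-- ===== PORT B =====
def countMinOperations_alt (distance : List Int) (targetDistance : List Int) : List Int :=
  let s := PySem.List.sorted distance (fun x => x)
  targetDistance.map (fun target => (s.map (fun d => |d - target|)).sum)

-- ===== PRECONDITION & SPEC =====
def Spec_countMinOperations (distance : List Int) (targetDistance : List Int) (out : List Int) : Prop := out = countMinOperations_alt distance targetDistance
instance (distance : List Int) (targetDistance : List Int) (out : List Int) : Decidable (Spec_countMinOperations distance targetDistance out) := by unfold Spec_countMinOperations; infer_instance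

-- ===== CLAIM (what is proved, stated in full; the proofs are below) =====
def Claim_equal_countMinOperations : Prop := ∀ (distance : List Int) (targetDistance : List Int), Dom_countMinOperations distance targetDistance → Spec_countMinOperations distance targetDistance (countMinOperations distance targetDistance)

-- ===== LEMMAS AND PROOFS =====

-- the prefix-sum list A builds, as a function of how many loop steps ran
def pvPrefix (s : List Int) (k : Nat) : List Int :=
  (List.range k).foldl (fun ps i => ps.set (i+1) (ps.getD i 0 + s.getD i 0))
    (List.replicate (s.length+1) 0)

theorem pvPrefix_len (s : List Int) (k : Nat) : (pvPrefix s k).length = s.length + 1 := by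
  induction k with
  | zero => simp [pvPrefix]
  | succ k ih =>
    unfold pvPrefix
    rw [List.range_succ, List.foldl_append]
    simpa [pvPrefix] using ih

theorem pvPrefix_getD (s : List Int) (k : Nat) (hk : k ≤ s.length) :
    ∀ j : Nat, j ≤ s.length →
      (pvPrefix s k).getD j 0 = if j ≤ k then (s.take j).sum else 0 := by
  induction k with
  | zero =>
    intro j hj
    simp only [pvPrefix, List.range_zero, List.foldl_nil]
    rcases Nat.eq_zero_or_pos j with h | h
    · subst h; simp
    · rw [if_neg (by omega)]
      simp [List.getD_eq_getElem?_getD, List.getElem?_replicate, hj, Nat.lt_succ_of_le hj]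
  | succ k ih =>
    intro j hj
    have hk' : k ≤ s.length := Nat.le_of_succ_le hk
    have hstep : pvPrefix s (k+1)
        = (pvPrefix s k).set (k+1) ((pvPrefix s k).getD k 0 + s.getD k 0) := by
      unfold pvPrefix
      rw [List.range_succ, List.foldl_append]
      rfl
    have hval : (pvPrefix s k).getD k 0 + s.getD k 0 = (s.take (k+1)).sum := by
      rw [ih hk' k hk', if_pos le_rfl]
      have hklt : k < s.length := hk
      rw [List.getD_eq_getElem?_getD, List.getElem?_eq_getElem hklt]
      rw [show s.take (k+1) = s.take k ++ [s[k]] from by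
        rw [List.take_add_one, List.getElem?_eq_getElem hklt]; rfl]
      rw [List.sum_append, List.sum_cons, List.sum_nil]
      simp
    rw [hstep, hval]
    by_cases hjk : j = k + 1
    · subst hjk
      rw [List.getD_eq_getElem?_getD, List.getElem?_set_self (by rw [pvPrefix_len]; omega)]
      simp
    · rw [List.getD_eq_getElem?_getD, List.getElem?_set_ne (by omega),
        ← List.getD_eq_getElem?_getD, ih hk' j hj]
      by_cases h1 : j ≤ k
      · rw [if_pos h1, if_pos (by omega)]
      · rw [if_neg h1, if_neg (by omega)]

theorem pv_sum_abs_lt (t : Int) (l : List Int) (h : ∀ d ∈ l, d < t) :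
    (l.map (fun d => |d - t|)).sum = (l.length : Int) * t - l.sum := by
  induction l with
  | nil => simp
  | cons x l ih =>
    have hx : x < t := h x (by simp)
    have := ih (fun d hd => h d (by simp [hd]))
    simp only [List.map_cons, List.sum_cons, List.length_cons, this]
    rw [abs_of_nonpos (by omega)]
    push_cast; ring

theorem pv_sum_abs_ge (t : Int) (l : List Int) (h : ∀ d ∈ l, t ≤ d) :
    (l.map (fun d => |d - t|)).sum = l.sum - (l.length : Int) * t := by
  induction l with
  | nil => simp
  | cons x l ih =>
    have hx : t ≤ x := h x (by simp)
    have := ih (fun d hd => h d (by simp [hd]))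
    simp only [List.map_cons, List.sum_cons, List.length_cons, this]
    rw [abs_of_nonneg (by omega)]
    push_cast; ring

-- per-target: A's prefix/bisect arithmetic equals the direct |d - t| sum, on a sorted list
theorem pv_target_eq (s : List Int) (hs : s.Pairwise (· ≤ ·)) (t : Int) :
    (PySem.List.bisectLeft s t : Int) * t - (s.take (PySem.List.bisectLeft s t)).sum
      + ((s.sum - (s.take (PySem.List.bisectLeft s t)).sum)
        - ((s.length : Int) - (PySem.List.bisectLeft s t : Int)) * t)
    = (s.map (fun d => |d - t|)).sum := by
  obtain ⟨hle, hlt, hge⟩ := PySem.List.bisectLeft_spec s t hs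
  set idx := PySem.List.bisectLeft s t with hidx
  have hsplit : s = s.take idx ++ s.drop idx := (List.take_append_drop idx s).symm
  have habs : (s.map (fun d => |d - t|)).sum
      = ((s.take idx).map (fun d => |d - t|)).sum + ((s.drop idx).map (fun d => |d - t|)).sum := by
    conv_lhs => rw [hsplit]
    simp
  have htakelen : (s.take idx).length = idx := by simp [Nat.min_eq_left hle]
  have hdroplen : (s.drop idx).length = s.length - idx := by simp
  have h1 : ((s.take idx).map (fun d => |d - t|)).sum = (idx : Int) * t - (s.take idx).sum := by
    rw [pv_sum_abs_lt t _ ?_, htakelen]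
    intro d hd
    obtain ⟨i, hi, hdi⟩ := List.mem_iff_getElem.mp hd
    have hi' : i < idx := by omega
    have : (s.take idx)[i] = s[i]'(by omega) := List.getElem_take
    rw [this] at hdi
    exact hdi ▸ hlt i (by omega) hi'
  have h2 : ((s.drop idx).map (fun d => |d - t|)).sum
      = (s.drop idx).sum - ((s.drop idx).length : Int) * t := by
    apply pv_sum_abs_ge
    intro d hd
    obtain ⟨i, hi, hdi⟩ := List.mem_iff_getElem.mp hd
    have : (s.drop idx)[i] = s[idx + i]'(by omega) := List.getElem_drop
    rw [this] at hdi
    exact hdi ▸ hge (idx + i) (by omega) (by omega)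
  have hdsum : (s.drop idx).sum = s.sum - (s.take idx).sum := by
    have := List.sum_take_add_sum_drop s idx
    omega
  rw [habs, h1, h2, hdsum, hdroplen]
  have : ((s.length - idx : Nat) : Int) = (s.length : Int) - (idx : Int) := by
    omega
  rw [this]

-- ===== VERDICT (by name: the statement is the Claim_ definition above) =====
theorem countMinOperations_spec : Claim_equal_countMinOperations := by
  intro distance targetDistance _
  unfold Spec_countMinOperations countMinOperations countMinOperations_alt
  set s := PySem.List.sorted distance (fun x => x) with hs
  have hpair : s.Pairwise (· ≤ ·) := PySem.List.sorted_pairwise distance (fun x => x)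
  rw [PySem.List.foldl_append_singleton_eq_map, List.nil_append]
  apply List.map_congr_left
  intro t _
  obtain ⟨hle, _, _⟩ := PySem.List.bisectLeft_spec s t hpair
  have hP : ∀ j : Nat, j ≤ s.length →
      (pvPrefix s s.length).getD j 0 = (s.take j).sum := by
    intro j hj
    rw [pvPrefix_getD s s.length le_rfl j hj, if_pos hj]
  show (PySem.List.bisectLeft s t : Int) * t - (pvPrefix s s.length).getD (PySem.List.bisectLeft s t) 0
      + (((pvPrefix s s.length).getD s.length 0 - (pvPrefix s s.length).getD (PySem.List.bisectLeft s t) 0)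
        - ((s.length : Int) - (PySem.List.bisectLeft s t : Int)) * t)
    = (s.map (fun d => |d - t|)).sum
  rw [hP _ hle, hP _ le_rfl, List.take_length]
  exact pv_target_eq s hpair t
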